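-- pv_equiv track=rewrite | github.com/pavdemesh/mipt_cs_on_python3 | week_08/lab_08_C.py | how_many_knights
-- ===== SOURCE A (Python) =====
-- def how_many_knights(answers_list: list):
--     """
--     Gets as input a list of answers right to left and last pointing to first
--     And determines how many knights are there guaranteed
--     """
--     num_of_knights = len(answers_list)
--     first_lier = [False] + [bool(x) for x in answers_list[:num_of_knights - 1]]
--     first_knight = [True] + [bool(x) for x in answers_list[:num_of_knights - 1]]
--
--     knights_count_first_lier = 0
--     knights_count_first_knight = 0
--
--     for i in range(num_of_knights - 1):
--         if first_lier[i]:
--             continue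
--         else:
--             first_lier[i + 1] = not first_lier[i + 1]
--
--     for k in range(num_of_knights - 1):
--         if first_knight[k]:
--             continue
--         else:
--             first_knight[k + 1] = not first_knight[k + 1]
--
--     for is_knight in first_lier:
--         if is_knight:
--             knights_count_first_lier += 1
--
--     for is_knight in first_knight:
--         if is_knight:
--             knights_count_first_knight += 1
--
--     return min(knights_count_first_lier, knights_count_first_knight)
-- ===== SOURCE B (Python) =====
-- def how_many_knights(answers_list: list):
--     """Single pass: track the parity chain for the 'first is liar' seed and
--     count knights; the 'first is knight' chain is its pointwise complement,
--     so its count is n - count."""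
--     n = len(answers_list)
--     count = 0
--     parity = False
--     for x in answers_list[:n - 1]:
--         parity = (parity == bool(x))
--         if parity:
--             count += 1
--     return min(count, n - count)
-- ===== Notes on version B (the rewrite author's own statement) =====
-- stated objective: simpler
-- what changed: Replaces the two materialized seat arrays, the two index-based flip loops and the two counting loops by a single pass that tracks one parity chain with a running count, using that the second chain is the pointwise complement of the first (count2 = n - count1).
import Mathlib
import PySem

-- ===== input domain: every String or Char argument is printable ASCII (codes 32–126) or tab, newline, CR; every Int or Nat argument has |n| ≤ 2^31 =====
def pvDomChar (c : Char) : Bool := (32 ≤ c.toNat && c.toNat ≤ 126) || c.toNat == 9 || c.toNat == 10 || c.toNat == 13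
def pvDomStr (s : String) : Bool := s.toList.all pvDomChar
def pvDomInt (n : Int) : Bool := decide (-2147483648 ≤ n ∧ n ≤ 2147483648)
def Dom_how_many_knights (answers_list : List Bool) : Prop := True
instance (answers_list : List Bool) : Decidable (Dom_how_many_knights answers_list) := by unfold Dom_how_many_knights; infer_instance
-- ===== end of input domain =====

-- B replaces A's four passes (two array builds + flips, two counts) by one pass over one
-- parity chain, using count2 = n - count1; return values are equal on all inputs.

-- ===== PORT A =====
-- one step of Python's flip loop: 'if arr[i]: continue; else: arr[i+1] = not arr[i+1]'
def pvFlipStep (a : List Bool) (i : Nat) : List Bool :=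
  if a.getD i false then a else a.set (i + 1) (!(a.getD (i + 1) false))

-- 'for i in range(m): …' over the mutable list
def pvFlipLoop (a : List Bool) (m : Nat) : List Bool :=
  (List.range m).foldl pvFlipStep a

-- 'for is_knight in …: if is_knight: count += 1'
def pvCountLoop (a : List Bool) (c : Int) : Int :=
  a.foldl (fun acc b => if b then acc + 1 else acc) c

def how_many_knights (answers_list : List Bool) : Int :=
  let num_of_knights := answers_list.length
  let first_lier := false :: answers_list.take (num_of_knights - 1)
  let first_knight := true :: answers_list.take (num_of_knights - 1)
  let first_lier := pvFlipLoop first_lier (num_of_knights - 1)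
  let first_knight := pvFlipLoop first_knight (num_of_knights - 1)
  let knights_count_first_lier := pvCountLoop first_lier 0
  let knights_count_first_knight := pvCountLoop first_knight 0
  min knights_count_first_lier knights_count_first_knight

-- ===== PORT B =====
-- single pass: state = (count, parity), 'parity = (parity == bool(x)); if parity: count += 1'
def pvBStep (st : Int × Bool) (x : Bool) : Int × Bool :=
  let p := (st.2 == x)
  (if p then st.1 + 1 else st.1, p)

def how_many_knights_alt (answers_list : List Bool) : Int :=
  let n := answers_list.length
  let count := ((answers_list.take (n - 1)).foldl pvBStep (0, false)).1
  min count ((n : Int) - count)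

-- ===== PRECONDITION & SPEC =====
def Spec_how_many_knights (answers_list : List Bool) (out : Int) : Prop := out = how_many_knights_alt answers_list
instance (answers_list : List Bool) (out : Int) : Decidable (Spec_how_many_knights answers_list out) := by unfold Spec_how_many_knights; infer_instance

-- ===== CLAIM (what is proved, stated in full; the proofs are below) =====
def Claim_equal_how_many_knights : Prop := ∀ (answers_list : List Bool), Dom_how_many_knights answers_list → Spec_how_many_knights answers_list (how_many_knights answers_list)

-- ===== LEMMAS AND PROOFS =====

-- the parity chain: value of each seat after the sequential flip loop
def pvChain : Bool → List Bool → List Bool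
  | b, [] => [b]
  | b, x :: rs => b :: pvChain (b == x) rs

-- number of true entries
def pvCntT : List Bool → Int
  | [] => 0
  | x :: rs => (if x then 1 else 0) + pvCntT rs

theorem pvChain_length (b : Bool) (l : List Bool) : (pvChain b l).length = l.length + 1 := by
  induction l generalizing b with
  | nil => simp [pvChain]
  | cons x rs ih => simp [pvChain, ih]

-- A's counting loop is pvCntT
theorem pvCnt_eq (a : List Bool) (c : Int) :
    a.foldl (fun acc b => if b then acc + 1 else acc) c = c + pvCntT a := by
  induction a generalizing c with
  | nil => simp [pvCntT]
  | cons x rs ih =>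
    rw [List.foldl_cons]
    cases x
    · simpa [pvCntT] using ih c
    · rw [show (if (true : Bool) = true then c + 1 else c) = c + 1 from rfl, ih (c + 1)]
      simp [pvCntT]; ring

-- the flip loop, started past an already-final prefix, produces the parity chain
theorem pvFlip_inv (rest done : List Bool) (b : Bool) :
    (List.range' done.length rest.length).foldl pvFlipStep (done ++ b :: rest)
      = done ++ pvChain b rest := by
  induction rest generalizing done b with
  | nil => simp [pvChain]
  | cons x rs ih =>
    rw [show (x :: rs).length = rs.length + 1 from rfl, List.range'_succ, List.foldl_cons]
    cases b
    · have hset : (done ++ false :: x :: rs).set (done.length + 1) (!x)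
          = done ++ false :: (!x) :: rs := by
        rw [List.set_append_right _ _ (by omega)]
        simp
      have hstep : pvFlipStep (done ++ false :: x :: rs) done.length
          = done ++ false :: (!x) :: rs := by
        have hget : (done ++ false :: x :: rs).getD done.length false = false := by
          simp [List.getD]
        have hget2 : (done ++ false :: x :: rs).getD (done.length + 1) false = x := by
          simp [List.getD]
        simp [pvFlipStep, hset]
      rw [hstep]
      have := ih (done ++ [false]) (!x)
      simp only [List.append_assoc, List.cons_append, List.nil_append,
        List.length_append, List.length_cons, List.length_nil] at this ⊢
      rw [this]
      simp [pvChain]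
    · have hstep : pvFlipStep (done ++ true :: x :: rs) done.length
          = done ++ true :: x :: rs := by
        have hget : (done ++ true :: x :: rs).getD done.length false = true := by
          simp [List.getD]
        simp [pvFlipStep]
      rw [hstep]
      have := ih (done ++ [true]) x
      simp only [List.append_assoc, List.cons_append, List.nil_append,
        List.length_append, List.length_cons, List.length_nil] at this ⊢
      rw [this]
      simp [pvChain]

theorem pvFlipLoop_chain (b : Bool) (l : List Bool) :
    pvFlipLoop (b :: l) l.length = pvChain b l := by
  have := pvFlip_inv l ([] : List Bool) b
  simpa [pvFlipLoop, List.range_eq_range'] using this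

-- complement seed ⇒ pointwise complemented chain
theorem pvChain_not (b : Bool) (l : List Bool) :
    pvChain (!b) l = (pvChain b l).map (fun t => !t) := by
  induction l generalizing b with
  | nil => simp [pvChain]
  | cons x rs ih =>
    have h : ((!b) == x) = !(b == x) := by cases b <;> cases x <;> rfl
    simp [pvChain, h, ih]

theorem pvCntT_map_not (a : List Bool) :
    pvCntT (a.map (fun t => !t)) = (a.length : Int) - pvCntT a := by
  induction a with
  | nil => simp [pvCntT]
  | cons x rs ih =>
    cases x <;> simp [pvCntT, ih] <;> ring

-- B's fold computes the count of trues of the corresponding parity chain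
theorem pvBfold (l : List Bool) (c : Int) (p : Bool) :
    (l.foldl pvBStep (c, p)).1 = c + pvCntT (pvChain p l) - (if p then 1 else 0) := by
  induction l generalizing c p with
  | nil => cases p <;> simp [pvChain, pvCntT]
  | cons x rs ih =>
    rw [List.foldl_cons,
      show pvBStep (c, p) x = (if (p == x) then c + 1 else c, (p == x)) from rfl, ih]
    simp only [pvChain, pvCntT]
    cases hpx : (p == x) <;> cases p <;> simp <;> ring

-- ===== VERDICT (by name: the statement is the Claim_ definition above) =====
theorem how_many_knights_spec : Claim_equal_how_many_knights := by
  intro l _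
  unfold Spec_how_many_knights how_many_knights how_many_knights_alt pvCountLoop
  cases l with
  | nil => decide
  | cons y ys =>
    simp only []
    set t := (y :: ys).take ((y :: ys).length - 1) with ht
    have hlen : t.length = (y :: ys).length - 1 := by rw [ht]; simp
    have hfl : pvFlipLoop (false :: t) ((y :: ys).length - 1) = pvChain false t := by
      rw [← hlen]; exact pvFlipLoop_chain false t
    have hfk : pvFlipLoop (true :: t) ((y :: ys).length - 1) = pvChain true t := by
      rw [← hlen]; exact pvFlipLoop_chain true t
    rw [hfl, hfk, pvCnt_eq, pvCnt_eq]
    have hknight : pvCntT (pvChain true t)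
        = ((y :: ys).length : Int) - pvCntT (pvChain false t) := by
      have hmap : pvChain true t = (pvChain false t).map (fun b => !b) := by
        simpa using pvChain_not false t
      rw [hmap, pvCntT_map_not, pvChain_length, hlen]
      have hcast : ((y :: ys).length - 1 + 1 : Nat) = (y :: ys).length := by
        simp
      rw [hcast]
    have hb : (t.foldl pvBStep (0, false)).1 = pvCntT (pvChain false t) := by
      rw [pvBfold]; simp
    rw [hknight, hb]
    simp
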